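-- pv_equiv track=rewrite | github.com/JinSon12/AlgorithmsPractice | 백준/실버3/SEP_14_접두사찾기.py | solve
-- ===== SOURCE A (Python) =====
-- from bisect import bisect_left
--
-- def solve(corpus, texts):
--     corpus = sorted(corpus)
--     count = 0
--     for text in texts:
--         idx = bisect_left(corpus, text)
--         # bisect_left 를 사용해서 이분 탐색 구현, startswith
--         if idx < len(corpus) and corpus[idx].startswith(text):
--             count += 1
--     return count
-- ===== SOURCE B (Python) =====
-- def solve(corpus, texts):
--     prefixes = set()
--     for w in corpus:
--         for k in range(len(w) + 1):
--             prefixes.add(w[:k])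
--     return sum(1 for t in texts if t in prefixes)
-- ===== Notes on version B (the rewrite author's own statement) =====
-- stated objective: alternative
-- what changed: Replaced A's sort-then-binary-search (sorted corpus + bisect_left + startswith at the insertion point) by building a hash set of every prefix of every corpus word once, then counting the texts by O(1) set membership.
import Mathlib
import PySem

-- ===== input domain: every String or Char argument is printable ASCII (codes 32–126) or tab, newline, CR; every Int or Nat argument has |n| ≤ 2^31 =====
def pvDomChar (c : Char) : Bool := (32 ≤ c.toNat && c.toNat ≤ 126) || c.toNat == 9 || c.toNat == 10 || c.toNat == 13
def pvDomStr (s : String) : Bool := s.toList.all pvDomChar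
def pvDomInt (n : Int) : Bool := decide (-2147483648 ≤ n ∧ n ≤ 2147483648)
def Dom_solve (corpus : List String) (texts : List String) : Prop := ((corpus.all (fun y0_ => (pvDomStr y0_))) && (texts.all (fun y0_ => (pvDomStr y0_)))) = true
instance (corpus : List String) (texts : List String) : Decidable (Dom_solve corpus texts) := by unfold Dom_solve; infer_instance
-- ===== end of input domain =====

-- B replaces A's sort + bisect_left binary search by a hash set of all prefixes
-- of all corpus words, then counts texts by set membership; alternative, not measured faster.

-- ===== PORT A =====
-- A: corpus = sorted(corpus); for each text, idx = bisect_left(corpus, text);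
--    count += 1 if idx < len(corpus) and corpus[idx].startswith(text).
def solve (corpus : List String) (texts : List String) : Int :=
  let corpus' := PySem.List.sorted corpus (fun x => x)
  texts.foldl
    (fun count text =>
      if (decide (PySem.List.bisectLeft corpus' text < corpus'.length) &&
          PySem.Str.startswith (corpus'.getD (PySem.List.bisectLeft corpus' text) "") text) then
        count + 1
      else count) 0

-- ===== PORT B =====
-- B: prefixes = set(); for w in corpus: for k in range(len(w)+1): prefixes.add(w[:k]);
--    return sum(1 for t in texts if t in prefixes)
def solve_alt (corpus : List String) (texts : List String) : Int :=
  let prefixes : PySem.Set String :=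
    corpus.foldl
      (fun s w =>
        (PySem.List.pyRange 0 ((PySem.Str.len w : Int) + 1) 1).foldl
          (fun s2 k => PySem.Set.add s2 (PySem.Str.slice w none (some k))) s)
      PySem.Set.empty
  ((texts.countP (fun t => PySem.Set.contains prefixes t) : Nat) : Int)

-- ===== PRECONDITION & SPEC =====
def Spec_solve (corpus : List String) (texts : List String) (out : Int) : Prop := out = solve_alt corpus texts
instance (corpus : List String) (texts : List String) (out : Int) : Decidable (Spec_solve corpus texts out) := by unfold Spec_solve; infer_instance

-- ===== CLAIM (what is proved, stated in full; the proofs are below) =====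
def Claim_equal_solve : Prop := ∀ (corpus : List String) (texts : List String), Dom_solve corpus texts → Spec_solve corpus texts (solve corpus texts)

-- ===== LEMMAS AND PROOFS =====

-- A prefix of w is never lexicographically greater than w.
theorem pv_prefix_not_lt (t w : List Char) (h : t <+: w) : ¬ w < t := by
  obtain ⟨r, rfl⟩ := h
  induction t with
  | nil => exact List.not_lt_nil r
  | cons a t ih =>
    intro hc
    rcases List.cons_lt_cons_iff.mp hc with hlt | ⟨_, hlt⟩
    · exact lt_irrefl _ hlt
    · exact ih hlt

-- If t is a prefix of w and s lies between t and w in lexicographic order, t is a prefix of s.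
theorem pv_prefix_sandwich (t : List Char) : ∀ (s w : List Char), t <+: w → ¬ s < t → ¬ w < s → t <+: s := by
  induction t with
  | nil => intro s w _ _ _; exact List.nil_prefix
  | cons a t ih =>
    intro s w hpre h1 h2
    obtain ⟨w', rfl, hpre'⟩ : ∃ w', w = a :: w' ∧ t <+: w' := by
      cases w with
      | nil => exact absurd hpre (by simp)
      | cons b w' =>
        obtain ⟨rfl, h⟩ := List.cons_prefix_cons.mp hpre
        exact ⟨w', rfl, h⟩
    cases s with
    | nil => exact absurd (List.nil_lt_cons _ _) h1
    | cons b s =>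
      have hab : a = b := by
        rcases lt_trichotomy a b with h | h | h
        · exact absurd (List.cons_lt_cons_iff.mpr (Or.inl h)) h2
        · exact h
        · exact absurd (List.cons_lt_cons_iff.mpr (Or.inl h)) h1
      subst hab
      have h1' : ¬ s < t := fun hc => h1 (List.cons_lt_cons_iff.mpr (Or.inr ⟨rfl, hc⟩))
      have h2' : ¬ w' < s := fun hc => h2 (List.cons_lt_cons_iff.mpr (Or.inr ⟨rfl, hc⟩))
      exact List.cons_prefix_cons.mpr ⟨rfl, ih s w' hpre' h1' h2'⟩

-- Correctness of PySem's bisect_left loop over ANY linear order (the library's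
-- PySem.List.bisectLeft_spec is stated for Int only; here we need it for String).
theorem pv_bisectLoop_spec {α : Type} [LinearOrder α] (xs : List α) (x : α)
    (hmono : ∀ (i j : Nat) (hi : i < xs.length) (hj : j < xs.length), i ≤ j → xs[i] ≤ xs[j]) :
    ∀ (fuel lo hi : Nat), lo ≤ hi → hi ≤ xs.length → hi - lo ≤ fuel →
    (∀ (j : Nat) (hj : j < xs.length), j < lo → xs[j] < x) →
    (∀ (j : Nat) (hj : j < xs.length), hi ≤ j → x ≤ xs[j]) →
    PySem.List.bisectLeftLoop xs x fuel lo hi ≤ xs.length ∧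
    (∀ (j : Nat) (hj : j < xs.length), j < PySem.List.bisectLeftLoop xs x fuel lo hi → xs[j] < x) ∧
    (∀ (j : Nat) (hj : j < xs.length), PySem.List.bisectLeftLoop xs x fuel lo hi ≤ j → x ≤ xs[j]) := by
  intro fuel
  induction fuel with
  | zero =>
    intro lo hi h1 h2 h3 hlow hhigh
    have hres : PySem.List.bisectLeftLoop xs x 0 lo hi = lo := rfl
    rw [hres]
    exact ⟨by omega, fun j hj hlt => hlow j hj hlt, fun j hj hle => hhigh j hj (by omega)⟩
  | succ n ih =>
    intro lo hi h1 h2 h3 hlow hhigh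
    have hres : PySem.List.bisectLeftLoop xs x (n + 1) lo hi =
        if lo < hi then
          match xs[(lo + hi) / 2]? with
          | some y =>
            if y < x then PySem.List.bisectLeftLoop xs x n ((lo + hi) / 2 + 1) hi
            else PySem.List.bisectLeftLoop xs x n lo ((lo + hi) / 2)
          | none => lo
        else lo := rfl
    rw [hres]
    by_cases hlt : lo < hi
    · simp only [if_pos hlt]
      have hmid : (lo + hi) / 2 < hi := by omega
      have hmidlo : lo ≤ (lo + hi) / 2 := by omega
      have hmidlen : (lo + hi) / 2 < xs.length := lt_of_lt_of_le hmid h2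
      rw [List.getElem?_eq_getElem hmidlen]
      by_cases hy : xs[(lo + hi) / 2] < x
      · simp only [if_pos hy]
        exact ih ((lo + hi) / 2 + 1) hi (by omega) h2 (by omega)
          (fun j hj hjlt => lt_of_le_of_lt (hmono j ((lo + hi) / 2) hj hmidlen (by omega)) hy)
          hhigh
      · simp only [if_neg hy]
        exact ih lo ((lo + hi) / 2) (by omega) (by omega) (by omega)
          hlow
          (fun j hj hjle => le_trans (not_lt.mp hy) (hmono ((lo + hi) / 2) j hmidlen hj hjle))
    · simp only [if_neg hlt]
      exact ⟨by omega, fun j hj hjlt => hlow j hj hjlt, fun j hj hle => hhigh j hj (by omega)⟩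

theorem pv_bisect_spec {α : Type} [LinearOrder α] (xs : List α) (x : α)
    (hsort : xs.Pairwise (· ≤ ·)) :
    PySem.List.bisectLeft xs x ≤ xs.length ∧
    (∀ (j : Nat) (hj : j < xs.length), j < PySem.List.bisectLeft xs x → xs[j] < x) ∧
    (∀ (j : Nat) (hj : j < xs.length), PySem.List.bisectLeft xs x ≤ j → x ≤ xs[j]) := by
  have hmono : ∀ (i j : Nat) (hi : i < xs.length) (hj : j < xs.length), i ≤ j → xs[i] ≤ xs[j] := by
    intro i j hi hj hij
    rcases eq_or_lt_of_le hij with rfl | hlt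
    · exact le_refl _
    · exact (List.pairwise_iff_getElem.mp hsort) i j hi hj hlt
  exact pv_bisectLoop_spec xs x hmono xs.length 0 xs.length (Nat.zero_le _) (le_refl _)
    (by omega) (by omega) (by intro j hj hle; omega)

-- startswith as a lexicographic-order fact on String.
theorem pv_startswith_iff (s p : String) :
    PySem.Str.startswith s p = true ↔ p.toList <+: s.toList := by
  rw [PySem.Str.startswith_eq]; exact PySem.Chars.startswith_iff _ _

-- THE per-text characterisation: A's bisect test hits iff some corpus word has the text as prefix.
theorem pv_hit_iff (corpus : List String) (t : String) :
    ((decide (PySem.List.bisectLeft (PySem.List.sorted corpus (fun x => x)) t <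
        (PySem.List.sorted corpus (fun x => x)).length) &&
      PySem.Str.startswith
        ((PySem.List.sorted corpus (fun x => x)).getD
          (PySem.List.bisectLeft (PySem.List.sorted corpus (fun x => x)) t) "") t) = true)
    ↔ ∃ w ∈ corpus, PySem.Str.startswith w t = true := by
  set sc := PySem.List.sorted corpus (fun x => x) with hsc
  have hpw : sc.Pairwise (· ≤ ·) := PySem.List.sorted_pairwise corpus (fun x => x)
  obtain ⟨hle, hbelow, habove⟩ := pv_bisect_spec sc t hpw
  set i := PySem.List.bisectLeft sc t with hi
  rw [Bool.and_eq_true, decide_eq_true_iff]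
  constructor
  · rintro ⟨hilen, hstart⟩
    rw [List.getD_eq_getElem sc "" hilen] at hstart
    exact ⟨sc[i], (PySem.List.mem_sorted corpus (fun x => x) false sc[i]).mp (List.getElem_mem hilen), hstart⟩
  · rintro ⟨w, hwmem, hw⟩
    have hwsc : w ∈ sc := (PySem.List.mem_sorted corpus (fun x => x) false w).mpr hwmem
    obtain ⟨j, hj, rfl⟩ := List.mem_iff_getElem.mp hwsc
    have hpre : t.toList <+: sc[j].toList := (pv_startswith_iff _ _).mp hw
    have hnotlt : ¬ sc[j] < t := fun hc =>
      pv_prefix_not_lt t.toList sc[j].toList hpre (String.lt_iff_toList_lt.mp hc)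
    have hij : i ≤ j := by
      by_contra hc
      exact hnotlt (hbelow j hj (by omega))
    have hilen : i < sc.length := lt_of_le_of_lt hij hj
    refine ⟨hilen, ?_⟩
    rw [List.getD_eq_getElem sc "" hilen]
    have hti : t ≤ sc[i] := habove i hilen (le_refl _)
    have hiw : sc[i] ≤ sc[j] := by
      rcases eq_or_lt_of_le hij with heq | hlt
      · subst heq; exact le_refl _
      · exact List.pairwise_iff_getElem.mp hpw i j hilen hj hlt
    exact (pv_startswith_iff _ _).mpr
      (pv_prefix_sandwich t.toList sc[i].toList sc[j].toList hpre
        (fun hc => absurd (String.lt_iff_toList_lt.mpr hc) (not_lt.mpr hti))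
        (fun hc => absurd (String.lt_iff_toList_lt.mpr hc) (not_lt.mpr hiw)))

-- Membership in a fold of set-adds of g over a list.
theorem pv_mem_foldl_add {β : Type} (g : β → String) (ks : List β) :
    ∀ (init : PySem.Set String) (x : String),
    x ∈ ks.foldl (fun s k => PySem.Set.add s (g k)) init ↔ x ∈ init ∨ ∃ k ∈ ks, x = g k := by
  induction ks with
  | nil => intro init x; simp
  | cons k ks ih =>
    intro init x
    simp only [List.foldl_cons, ih, PySem.Set.mem_add, List.mem_cons]
    constructor
    · rintro (⟨h | h⟩ | ⟨k', hk', rfl⟩)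
      · exact Or.inl h
      · exact Or.inr ⟨k, Or.inl rfl, h⟩
      · exact Or.inr ⟨k', Or.inr hk', rfl⟩
    · rintro (h | ⟨k', (rfl | hk'), rfl⟩)
      · exact Or.inl (Or.inl h)
      · exact Or.inl (Or.inr rfl)
      · exact Or.inr ⟨k', hk', rfl⟩

-- Membership in B's prefix set.
theorem pv_mem_prefixSet (corpus : List String) :
    ∀ (init : PySem.Set String) (x : String),
    x ∈ corpus.foldl
        (fun s w =>
          (PySem.List.pyRange 0 ((PySem.Str.len w : Int) + 1) 1).foldl
            (fun s2 k => PySem.Set.add s2 (PySem.Str.slice w none (some k))) s)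
        init
    ↔ x ∈ init ∨ ∃ w ∈ corpus, ∃ k ∈ PySem.List.pyRange 0 ((PySem.Str.len w : Int) + 1) 1,
        x = PySem.Str.slice w none (some k) := by
  induction corpus with
  | nil => intro init x; simp
  | cons w ws ih =>
    intro init x
    simp only [List.foldl_cons, ih, pv_mem_foldl_add, List.mem_cons]
    constructor
    · rintro (⟨h | ⟨k, hk, rfl⟩⟩ | ⟨w', hw', hex⟩)
      · exact Or.inl h
      · exact Or.inr ⟨w, Or.inl rfl, k, hk, rfl⟩
      · exact Or.inr ⟨w', Or.inr hw', hex⟩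
    · rintro (h | ⟨w', (rfl | hw'), hex⟩)
      · exact Or.inl (Or.inl h)
      · exact Or.inl (Or.inr hex)
      · exact Or.inr ⟨w', hw', hex⟩

-- t is a slice w[:k] for some k in range(len(w)+1) iff t is a prefix of w.
theorem pv_slice_iff (w t : String) :
    (∃ k ∈ PySem.List.pyRange 0 ((PySem.Str.len w : Int) + 1) 1,
       t = PySem.Str.slice w none (some k))
    ↔ t.toList <+: w.toList := by
  constructor
  · rintro ⟨k, hk, rfl⟩
    obtain ⟨hk0, _⟩ := PySem.List.mem_pyRange_one.mp hk
    simp only [PySem.Str.slice, PySem.Chars.slice, PySem.List.slice_to _ hk0]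
    rw [String.toList_ofList]
    exact List.take_prefix _ _
  · intro hpre
    refine ⟨(t.toList.length : Int), ?_, ?_⟩
    · rw [PySem.List.mem_pyRange_one]
      have := hpre.length_le
      rw [PySem.Str.len_eq] at *
      omega
    · simp only [PySem.Str.slice, PySem.Chars.slice, PySem.List.slice_to _ (Int.natCast_nonneg _)]
      rw [Int.toNat_natCast, ← List.prefix_iff_eq_take.mp hpre]
      exact String.ofList_toList.symm

-- ===== VERDICT (by name: the statement is the Claim_ definition above) =====
theorem solve_spec : Claim_equal_solve := by
  intro corpus texts _
  unfold Spec_solve solve solve_alt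
  rw [PySem.List.foldl_if_add_one
    (fun text =>
      decide (PySem.List.bisectLeft (PySem.List.sorted corpus (fun x => x)) text <
        (PySem.List.sorted corpus (fun x => x)).length) &&
      PySem.Str.startswith
        ((PySem.List.sorted corpus (fun x => x)).getD
          (PySem.List.bisectLeft (PySem.List.sorted corpus (fun x => x)) text) "") text) texts 0]
  rw [zero_add]
  congr 1
  apply List.countP_congr
  intro t _
  rw [pv_hit_iff corpus t, PySem.Set.contains_iff, pv_mem_prefixSet]
  simp only [PySem.Set.empty, List.not_mem_nil, false_or]
  constructor
  · rintro ⟨w, hw, hstart⟩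
    exact ⟨w, hw, (pv_slice_iff w t).mpr ((pv_startswith_iff w t).mp hstart)⟩
  · rintro ⟨w, hw, hex⟩
    exact ⟨w, hw, (pv_startswith_iff w t).mpr ((pv_slice_iff w t).mp hex)⟩
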